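-- pv_equiv track=rewrite | github.com/toto9114/django-api-template | common_lib/utils/accept_language_parser.py | accept_language_parser
-- ===== SOURCE A (Python) =====
-- def accept_language_parser(
--     accept_language: str, reserved_language: tuple = ("en", "ko")
-- ) -> str:
--     languages = accept_language.split(",")
--     locale_q_pairs = []
--
--     for language in languages:
--         if language.split(";")[0] == language:
--             locale_q_pairs.append((language.strip(), "1"))
--         else:
--             locale = language.split(";")[0].strip()
--             q = language.split(";")[1].split("=")[1]
--             locale_q_pairs.append((locale, q))
--
--         for locale_q_pair in locale_q_pairs:
--             if locale_q_pair[0] in reserved_language: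
--                 return locale_q_pair[0]
-- ===== SOURCE B (Python) =====
-- def accept_language_parser(
--     accept_language: str, reserved_language: tuple = ("en", "ko")
-- ) -> str:
--     # Only the just-parsed locale can be a new match, and the quality value is
--     # irrelevant to the result, so neither the pair list nor the inner rescan
--     # is needed: check each segment's locale directly.
--     for segment in accept_language.split(","):
--         locale = segment.split(";")[0].strip()
--         if locale in reserved_language:
--             return locale
--     return None
-- ===== Notes on version B (the rewrite author's own statement) =====
-- stated objective: simpler
-- what changed: B drops the accumulated locale-q pair list and the inner rescan over it (and the q-value parsing, which never affects the result): one linear pass checks each segment's locale directly.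
import Mathlib
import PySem

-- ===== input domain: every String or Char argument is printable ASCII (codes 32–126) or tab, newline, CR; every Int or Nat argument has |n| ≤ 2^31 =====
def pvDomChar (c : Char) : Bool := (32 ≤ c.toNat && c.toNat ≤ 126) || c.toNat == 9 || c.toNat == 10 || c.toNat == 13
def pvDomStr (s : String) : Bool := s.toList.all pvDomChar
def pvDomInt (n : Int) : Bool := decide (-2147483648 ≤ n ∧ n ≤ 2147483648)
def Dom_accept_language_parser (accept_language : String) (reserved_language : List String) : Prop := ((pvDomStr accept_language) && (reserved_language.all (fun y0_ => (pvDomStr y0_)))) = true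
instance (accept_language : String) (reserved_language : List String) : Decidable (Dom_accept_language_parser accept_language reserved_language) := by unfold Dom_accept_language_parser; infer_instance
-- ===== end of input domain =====

-- B replaces A's pair accumulation and inner rescan by one plain pass over the segments
-- (objective: simpler; Pre_ excludes exactly the inputs where A raises IndexError).


-- s.split(sep) for a nonempty literal sep (split? is none only for sep = "", so getD is exact here)
def pySplit (s sep : String) : List String := (PySem.Str.split? s sep).getD []

-- ===== PORT A =====
-- one iteration's pair construction; none = the IndexError of language.split(";")[1].split("=")[1]
-- (split(";")[1] itself is safe: the else branch implies ";" occurs, so the split has ≥ 2 parts)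
def alpPair (language : String) : Option (String × String) :=
  if (pySplit language ";").getD 0 "" = language then
    some (PySem.Str.strip language, "1")
  else
    let locale := PySem.Str.strip ((pySplit language ";").getD 0 "")
    match PySem.List.pyGet? (pySplit ((pySplit language ";").getD 1 "") "=") 1 with
    | none => none
    | some q => some (locale, q)

-- the for-loop over `languages`, carrying the accumulated locale_q_pairs list
def alpGo (reserved_language : List String) : List String → List (String × String) → Option String
  | [], _ => none
  | language :: rest, locale_q_pairs =>
    match alpPair language with
    | none => none
    | some pr =>
      let pairs' := locale_q_pairs ++ [pr]
      -- inner loop: for locale_q_pair in locale_q_pairs: if locale_q_pair[0] in reserved_language: return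
      match pairs'.find? (fun lq => reserved_language.contains lq.1) with
      | some lq => some lq.1
      | none => alpGo reserved_language rest pairs'

def accept_language_parser (accept_language : String) (reserved_language : List String) : Option String :=
  alpGo reserved_language (pySplit accept_language ",") []

-- ===== PORT B =====
-- for segment in accept_language.split(","): locale = segment.split(";")[0].strip(); if locale in reserved: return locale
def altGo (reserved_language : List String) : List String → Option String
  | [] => none
  | segment :: rest =>
    let locale := PySem.Str.strip ((pySplit segment ";").getD 0 "")
    if reserved_language.contains locale then some locale else altGo reserved_language rest

def accept_language_parser_alt (accept_language : String) (reserved_language : List String) : Option String :=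
  altGo reserved_language (pySplit accept_language ",")

-- ===== PRECONDITION & SPEC =====
-- the locale of a segment, and A's "segment whose q-part parsing raises IndexError" shape
def pvLocale (segment : String) : String := PySem.Str.strip ((pySplit segment ";").getD 0 "")
def pvMalformed (segment : String) : Prop :=
  (pySplit segment ";").getD 0 "" ≠ segment ∧ (pySplit ((pySplit segment ";").getD 1 "") "=").length < 2

-- Pre_ excludes exactly the inputs on which A raises IndexError: a segment with ';' but no '='
-- in its second ';'-part, reached before any reserved locale.
def Pre_accept_language_parser (accept_language : String) (reserved_language : List String) : Prop :=
  ∀ i < (pySplit accept_language ",").length,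
    pvMalformed ((pySplit accept_language ",").getD i "") →
      ∃ j < i, reserved_language.contains (pvLocale ((pySplit accept_language ",").getD j "")) = true
instance (accept_language : String) (reserved_language : List String) : Decidable (Pre_accept_language_parser accept_language reserved_language) := by unfold Pre_accept_language_parser pvMalformed; infer_instance

def pvWitness_accept_language_parser : String × List String := ("en-US,en;q=0.9,ko;q=0.8", ["en", "ko"])

def Spec_accept_language_parser (accept_language : String) (reserved_language : List String) (out : Option String) : Prop := out = accept_language_parser_alt accept_language reserved_language
instance (accept_language : String) (reserved_language : List String) (out : Option String) : Decidable (Spec_accept_language_parser accept_language reserved_language out) := by unfold Spec_accept_language_parser; infer_instance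

-- ===== CLAIM (what is proved, stated in full; the proofs are below) =====
def Claim_equal_accept_language_parser : Prop := ∀ (accept_language : String) (reserved_language : List String), Dom_accept_language_parser accept_language reserved_language → Pre_accept_language_parser accept_language reserved_language → Spec_accept_language_parser accept_language reserved_language (accept_language_parser accept_language reserved_language)

-- ===== LEMMAS AND PROOFS =====

theorem exists_pyGet1 (l : List String) (h : 2 ≤ l.length) :
    ∃ q, PySem.List.pyGet? l 1 = some q := by
  have h1 : PySem.List.pyGet? l (1 : Int) = l[1]? := by
    have := PySem.List.pyGet?_natCast l 1
    simpa using this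
  rw [h1]
  exact ⟨_, List.getElem?_eq_getElem (by omega)⟩

theorem alpPair_eq_some (language : String) (h : ¬ pvMalformed language) :
    ∃ pr, alpPair language = some pr ∧ pr.1 = pvLocale language := by
  unfold alpPair pvLocale
  by_cases hc : (pySplit language ";").getD 0 "" = language
  · rw [if_pos hc]
    exact ⟨_, rfl, by rw [hc]⟩
  · rw [if_neg hc]
    have hlen : 2 ≤ (pySplit ((pySplit language ";").getD 1 "") "=").length := by
      by_contra hlt
      exact h ⟨hc, by omega⟩
    obtain ⟨q, hq⟩ := exists_pyGet1 _ hlen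
    simp only [hq]
    exact ⟨_, rfl, rfl⟩

theorem altGo_cons (res : List String) (seg : String) (rest : List String) :
    altGo res (seg :: rest) =
      if res.contains (pvLocale seg) then some (pvLocale seg) else altGo res rest := by
  rw [altGo]
  simp only [pvLocale]

set_option maxHeartbeats 1000000 in
theorem go_eq (reserved_language : List String) (segs : List String)
    (pairs : List (String × String))
    (hpairs : ∀ p ∈ pairs, reserved_language.contains p.1 = false)
    (hpre : ∀ i < segs.length, pvMalformed (segs.getD i "") →
      ∃ j < i, reserved_language.contains (pvLocale (segs.getD j "")) = true) :
    alpGo reserved_language segs pairs = altGo reserved_language segs := by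
  induction segs generalizing pairs with
  | nil => rfl
  | cons language rest ih =>
    have hnotmal : ¬ pvMalformed language := by
      intro h
      obtain ⟨j, hj, _⟩ := hpre 0 (by simp) (by rw [List.getD_cons_zero]; exact h)
      omega
    have hfind_pairs : pairs.find? (fun lq => reserved_language.contains lq.1) = none := by
      rw [List.find?_eq_none]
      intro p hp
      simpa using hpairs p hp
    obtain ⟨pr, hpr, hloc⟩ := alpPair_eq_some language hnotmal
    rw [alpGo, hpr]
    show (match (pairs ++ [pr]).find? (fun lq => reserved_language.contains lq.1) with
      | some lq => some lq.1
      | none => alpGo reserved_language rest (pairs ++ [pr]))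
      = altGo reserved_language (language :: rest)
    have hfind : (pairs ++ [pr]).find? (fun lq => reserved_language.contains lq.1)
        = if reserved_language.contains pr.1 = true then some pr else none := by
      rw [List.find?_append, hfind_pairs]
      by_cases hb : pr.1 ∈ reserved_language
      · simp [List.find?, List.contains_eq_mem, hb]
      · simp [List.find?, List.contains_eq_mem, hb]
    rw [hfind]
    by_cases hres : reserved_language.contains (pvLocale language) = true
    · have hprt : reserved_language.contains pr.1 = true := by rw [hloc]; exact hres
      rw [if_pos hprt]
      show some pr.1 = altGo reserved_language (language :: rest)
      rw [altGo_cons, if_pos hres, hloc]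
    · have hres' : ¬ reserved_language.contains pr.1 = true := by rw [hloc]; exact hres
      rw [if_neg hres']
      show alpGo reserved_language rest (pairs ++ [pr]) = altGo reserved_language (language :: rest)
      have hpairs' : ∀ p ∈ pairs ++ [pr], reserved_language.contains p.1 = false := by
        intro p hp
        rcases List.mem_append.mp hp with hmem | hmem
        · exact hpairs p hmem
        · have hppr : p = pr := by simpa using hmem
          rw [hppr, hloc]
          exact Bool.eq_false_iff.mpr hres
      have hpre' : ∀ i < rest.length, pvMalformed (rest.getD i "") →
          ∃ j < i, reserved_language.contains (pvLocale (rest.getD j "")) = true := by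
        intro i hi hm
        have hm' : pvMalformed ((language :: rest).getD (i + 1) "") := by
          rw [List.getD_cons_succ]; exact hm
        obtain ⟨j, hj, hcj⟩ := hpre (i + 1)
          (by simp only [List.length_cons]; omega) hm'
        cases j with
        | zero =>
          rw [List.getD_cons_zero] at hcj
          exact absurd hcj hres
        | succ j' =>
          rw [List.getD_cons_succ] at hcj
          exact ⟨j', by omega, hcj⟩
      have IH := ih (pairs ++ [pr]) hpairs' hpre'
      rw [IH, altGo_cons, if_neg hres]

-- ===== VERDICT (by name: the statement is the Claim_ definition above) =====
theorem accept_language_parser_spec : Claim_equal_accept_language_parser := by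
  intro accept_language reserved_language _ hpre
  unfold Spec_accept_language_parser accept_language_parser accept_language_parser_alt
  exact go_eq reserved_language (pySplit accept_language ",") [] (by simp) hpre
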